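-- pv_equiv track=rewrite | github.com/binalfew/free-text-annotation | taxonomy_classifier.py | _classify_level1
-- ===== SOURCE A (Python) =====
-- def _classify_level1(actor_type: str, actor_text: str, victim_type: str, trigger: str) -> str:
--     """Classify Level 1 (high-level category)."""
--
--     # State Violence Against Civilians
--     state_indicators = ['state', 'police', 'military', 'soldier', 'officer', 'security force']
--     if any(ind in actor_text for ind in state_indicators):
--         if victim_type == 'civilian':
--             return 'State Violence Against Civilians'
--
--     # Criminal Violence
--     criminal_indicators = ['gang', 'robber', 'bandit', 'criminal']
--     if actor_type == 'criminal' or any(ind in actor_text for ind in criminal_indicators):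
--         return 'Criminal Violence'
--
--     # Political Violence (includes terrorism)
--     political_indicators = ['terrorist', 'rebel', 'insurgent', 'militant']
--     terrorism_indicators = ['shabaab', 'boko', 'haram', 'al-qaeda', 'isis', 'aqim']
--     if actor_type in ['terrorist', 'rebel'] or any(ind in actor_text for ind in terrorism_indicators):
--         return 'Political Violence'
--
--     # Communal Violence
--     communal_indicators = ['community', 'ethnic', 'tribal', 'clan']
--     if actor_type == 'communal' or any(ind in actor_text for ind in communal_indicators):
--         return 'Communal Violence'
--
--     # Election violence indicators
--     election_indicators = ['protest', 'election', 'opposition', 'demonstrator']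
--     if any(ind in actor_text for ind in election_indicators):
--         return 'Political Violence'
--
--     # Default to Political Violence for unknown armed actors
--     return 'Political Violence'
-- ===== SOURCE B (Python) =====
-- _KEYWORD_TAGS = [
--     ('state',    ['state', 'police', 'military', 'soldier', 'officer', 'security force']),
--     ('criminal', ['gang', 'robber', 'bandit', 'criminal']),
--     ('terror',   ['shabaab', 'boko', 'haram', 'al-qaeda', 'isis', 'aqim']),
--     ('communal', ['community', 'ethnic', 'tribal', 'clan']),
-- ]
--
-- _ACTOR_TAGS = {'criminal': 'criminal', 'terrorist': 'terror', 'rebel': 'terror', 'communal': 'communal'}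
--
--
-- def _classify_level1(actor_type: str, actor_text: str, victim_type: str, trigger: str) -> str:
--     """Tag-set classification: one pass gathers all matching tags, then precedence resolves them.
--
--     The election keyword scan of the original is dropped: its category equals the default."""
--     tags = {tag for tag, words in _KEYWORD_TAGS if any(w in actor_text for w in words)}
--     if actor_type in _ACTOR_TAGS:
--         tags.add(_ACTOR_TAGS[actor_type])
--     if 'state' in tags and victim_type == 'civilian':
--         return 'State Violence Against Civilians'
--     if 'criminal' in tags:
--         return 'Criminal Violence'
--     if 'terror' in tags:
--         return 'Political Violence'
--     if 'communal' in tags: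
--         return 'Communal Violence'
--     return 'Political Violence'
-- ===== Notes on version B (the rewrite author's own statement) =====
-- stated objective: simpler
-- what changed: Replaces the chain of guard-and-scan if/returns with a tag-set pipeline: one pass over a keyword->tag table plus an actor_type->tag dict collects every matching tag into a set, precedence is then resolved on the set; the election keyword scan is dropped because its category equals the default.
import Mathlib
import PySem

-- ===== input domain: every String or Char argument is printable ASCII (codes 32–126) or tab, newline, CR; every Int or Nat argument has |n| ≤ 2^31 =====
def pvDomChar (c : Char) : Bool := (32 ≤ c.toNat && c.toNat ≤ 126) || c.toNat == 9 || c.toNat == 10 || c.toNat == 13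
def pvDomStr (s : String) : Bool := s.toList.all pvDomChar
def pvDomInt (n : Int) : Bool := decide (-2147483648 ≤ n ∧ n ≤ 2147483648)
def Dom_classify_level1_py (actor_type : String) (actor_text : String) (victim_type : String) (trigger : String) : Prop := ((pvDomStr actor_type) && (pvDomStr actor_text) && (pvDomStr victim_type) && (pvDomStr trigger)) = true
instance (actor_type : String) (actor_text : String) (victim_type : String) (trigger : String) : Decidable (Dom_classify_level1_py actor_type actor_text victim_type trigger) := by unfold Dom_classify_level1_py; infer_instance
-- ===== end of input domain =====

-- B replaces A's chain of guard-and-scan if/returns by a tag-set pipeline: collect all matching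
-- tags in one pass over a keyword table (plus an actor_type dict), then resolve precedence
-- on the set; the election scan is dropped since its category equals the default (objective: simpler).

-- ===== PORT A =====
-- A's code after the state/civilian guard (fall-through shared by both arms)
def pvA_rest (actor_type : String) (actor_text : String) : String :=
  -- Criminal Violence
  let criminal_indicators := ["gang", "robber", "bandit", "criminal"]
  if actor_type == "criminal" || criminal_indicators.any (fun ind => PySem.Str.isIn ind actor_text) then
    "Criminal Violence"
  else
    -- Political Violence (includes terrorism)
    let terrorism_indicators := ["shabaab", "boko", "haram", "al-qaeda", "isis", "aqim"]
    if (actor_type == "terrorist" || actor_type == "rebel") || terrorism_indicators.any (fun ind => PySem.Str.isIn ind actor_text) then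
      "Political Violence"
    else
      -- Communal Violence
      let communal_indicators := ["community", "ethnic", "tribal", "clan"]
      if actor_type == "communal" || communal_indicators.any (fun ind => PySem.Str.isIn ind actor_text) then
        "Communal Violence"
      else
        -- Election violence indicators
        let election_indicators := ["protest", "election", "opposition", "demonstrator"]
        if election_indicators.any (fun ind => PySem.Str.isIn ind actor_text) then
          "Political Violence"
        else
          "Political Violence"

def classify_level1_py (actor_type : String) (actor_text : String) (victim_type : String) (trigger : String) : String :=
  -- State Violence Against Civilians
  let state_indicators := ["state", "police", "military", "soldier", "officer", "security force"]
  if state_indicators.any (fun ind => PySem.Str.isIn ind actor_text) then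
    if victim_type == "civilian" then "State Violence Against Civilians"
    else pvA_rest actor_type actor_text
  else pvA_rest actor_type actor_text

-- ===== PORT B =====
def pvKeywordTags : List (String × List String) :=
  [ ("state",    ["state", "police", "military", "soldier", "officer", "security force"])
  , ("criminal", ["gang", "robber", "bandit", "criminal"])
  , ("terror",   ["shabaab", "boko", "haram", "al-qaeda", "isis", "aqim"])
  , ("communal", ["community", "ethnic", "tribal", "clan"]) ]

def pvActorTags : PySem.Dict String String :=
  PySem.Dict.ofList [("criminal", "criminal"), ("terrorist", "terror"), ("rebel", "terror"), ("communal", "communal")]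

def classify_level1_py_alt (actor_type : String) (actor_text : String) (victim_type : String) (trigger : String) : String :=
  -- tags = {tag for tag, words in _KEYWORD_TAGS if any(w in actor_text for w in words)}
  let tags0 : PySem.Set String :=
    PySem.Set.ofList ((pvKeywordTags.filter
      (fun p => p.2.any (fun w => PySem.Str.isIn w actor_text))).map Prod.fst)
  -- if actor_type in _ACTOR_TAGS: tags.add(_ACTOR_TAGS[actor_type])
  let tags : PySem.Set String :=
    match PySem.Dict.get? pvActorTags actor_type with
    | some t => PySem.Set.add tags0 t
    | none => tags0
  if PySem.Set.contains tags "state" && victim_type == "civilian" then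
    "State Violence Against Civilians"
  else if PySem.Set.contains tags "criminal" then "Criminal Violence"
  else if PySem.Set.contains tags "terror" then "Political Violence"
  else if PySem.Set.contains tags "communal" then "Communal Violence"
  else "Political Violence"

-- ===== PRECONDITION & SPEC =====
def Spec_classify_level1_py (actor_type : String) (actor_text : String) (victim_type : String) (trigger : String) (out : String) : Prop := out = classify_level1_py_alt actor_type actor_text victim_type trigger
instance (actor_type : String) (actor_text : String) (victim_type : String) (trigger : String) (out : String) : Decidable (Spec_classify_level1_py actor_type actor_text victim_type trigger out) := by unfold Spec_classify_level1_py; infer_instance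

-- ===== CLAIM (what is proved, stated in full; the proofs are below) =====
def Claim_equal_classify_level1_py : Prop := ∀ (actor_type : String) (actor_text : String) (victim_type : String) (trigger : String), Dom_classify_level1_py actor_type actor_text victim_type trigger → Spec_classify_level1_py actor_type actor_text victim_type trigger (classify_level1_py actor_type actor_text victim_type trigger)

-- ===== LEMMAS AND PROOFS =====

-- get? on the literal actor-tag dict, spelled out as an if-chain
lemma pvActorTags_get? (a : String) : PySem.Dict.get? pvActorTags a =
    if "criminal" == a then some "criminal"
    else if "terrorist" == a then some "terror"
    else if "rebel" == a then some "terror"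
    else if "communal" == a then some "communal"
    else none := by
  rw [show pvActorTags = PySem.Dict.mk [("criminal", "criminal"), ("terrorist", "terror"), ("rebel", "terror"), ("communal", "communal")] from rfl]
  simp only [PySem.Dict.get?_mk_cons]
  rw [show (PySem.Dict.mk ([] : List (String × String))).get? a = none from rfl]

-- ===== VERDICT (by name: the statement is the Claim_ definition above) =====
theorem classify_level1_py_spec : Claim_equal_classify_level1_py := by
  intro actor_type actor_text victim_type trigger _
  unfold Spec_classify_level1_py classify_level1_py classify_level1_py_alt pvA_rest pvKeywordTags
  rw [pvActorTags_get?,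
    show (("criminal" : String) == actor_type) = (actor_type == "criminal") from Bool.beq_comm,
    show (("terrorist" : String) == actor_type) = (actor_type == "terrorist") from Bool.beq_comm,
    show (("rebel" : String) == actor_type) = (actor_type == "rebel") from Bool.beq_comm,
    show (("communal" : String) == actor_type) = (actor_type == "communal") from Bool.beq_comm]
  simp only [List.filter_cons, List.filter_nil]
  rcases Bool.eq_false_or_eq_true ((["state", "police", "military", "soldier", "officer", "security force"] : List String).any (fun ind => PySem.Str.isIn ind actor_text)) with hs | hs <;>
  rcases Bool.eq_false_or_eq_true ((["gang", "robber", "bandit", "criminal"] : List String).any (fun ind => PySem.Str.isIn ind actor_text)) with hc | hc <;>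
  rcases Bool.eq_false_or_eq_true ((["shabaab", "boko", "haram", "al-qaeda", "isis", "aqim"] : List String).any (fun ind => PySem.Str.isIn ind actor_text)) with ht | ht <;>
  rcases Bool.eq_false_or_eq_true ((["community", "ethnic", "tribal", "clan"] : List String).any (fun ind => PySem.Str.isIn ind actor_text)) with hm | hm <;>
  rcases Bool.eq_false_or_eq_true ((["protest", "election", "opposition", "demonstrator"] : List String).any (fun ind => PySem.Str.isIn ind actor_text)) with he | he <;>
    simp only [hs, hc, ht, hm, he, if_true] <;>
    generalize (victim_type == "civilian") = b0 <;>
    generalize (actor_type == "criminal") = b1 <;>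
    generalize (actor_type == "terrorist") = b2 <;>
    generalize (actor_type == "rebel") = b3 <;>
    generalize (actor_type == "communal") = b4 <;>
    revert b0 b1 b2 b3 b4 <;> decide
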